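-- pv_equiv track=rewrite | github.com/Renukaaaaa/daily-python-challenge | day6.py | subarrays
-- ===== SOURCE A (Python) =====
-- def subarrays(arr):
--     n = len(arr)
--     result = []
--
--     for start in range(n):
--         total = 0
--         for end in range(start, n):
--             total += arr[end]
--             if total == 0:
--                 result.append((start, end))
--     return result
-- ===== SOURCE B (Python) =====
-- def subarrays(arr):
--     # Prefix sums + hash index of positions per prefix value:
--     # (i, j) has zero sum iff prefix[j+1] == prefix[i].
--     prefix = [0]
--     for x in arr:
--         prefix.append(prefix[-1] + x)
--     pos = {}
--     for t, v in enumerate(prefix):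
--         pos.setdefault(v, []).append(t)
--     result = []
--     for i in range(len(arr)):
--         for t in pos[prefix[i]]:
--             if t > i:
--                 result.append((i, t - 1))
--     return result
-- ===== Notes on version B (the rewrite author's own statement) =====
-- stated objective: faster
-- what changed: Replaces the nested start/end loops with running sums by one prefix-sum pass plus a hash map from prefix value to its positions; each start then emits exactly the matching ends from its bucket.
import Mathlib
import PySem

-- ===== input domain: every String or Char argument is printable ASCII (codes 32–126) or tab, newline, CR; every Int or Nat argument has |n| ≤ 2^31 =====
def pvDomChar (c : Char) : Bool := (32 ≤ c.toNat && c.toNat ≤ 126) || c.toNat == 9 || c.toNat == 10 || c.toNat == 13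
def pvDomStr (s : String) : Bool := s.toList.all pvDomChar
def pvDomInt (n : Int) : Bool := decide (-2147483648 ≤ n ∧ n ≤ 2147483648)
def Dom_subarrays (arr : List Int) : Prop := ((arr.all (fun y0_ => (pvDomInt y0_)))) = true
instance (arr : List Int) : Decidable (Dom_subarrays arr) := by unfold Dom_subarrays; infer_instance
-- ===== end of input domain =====

-- B replaces A's nested start/end loops (running inner sums) by one prefix-sum pass plus a
-- hash map from prefix value to its positions; objective: faster.

-- ===== PORT A =====
def subarrays (arr : List Int) : List (Int × Int) :=
  let n : Int := arr.length
  (PySem.List.pyRange 0 n 1).foldl (fun result start =>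
    ((PySem.List.pyRange start n 1).foldl
      (fun (st : Int × List (Int × Int)) e =>
        let total := st.1 + PySem.List.pyGetD arr e 0
        (total, if total = 0 then st.2 ++ [(start, e)] else st.2))
      (0, result)).2) []

-- ===== PORT B =====
def subarrays_alt (arr : List Int) : List (Int × Int) :=
  let pfx : List Int :=
    arr.foldl (fun p x => p ++ [PySem.List.pyGetD p (-1) 0 + x]) [0]
  let pos : PySem.Dict Int (List Int) :=
    (PySem.List.enumerate pfx 0).foldl
      (fun d tv => d.insert tv.2 (d.getD tv.2 [] ++ [tv.1])) PySem.Dict.empty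
  (PySem.List.pyRange 0 (arr.length : Int) 1).foldl (fun result i =>
    (pos.getD (PySem.List.pyGetD pfx i 0) []).foldl
      (fun res t => if t > i then res ++ [(i, t - 1)] else res) result) []

-- ===== PRECONDITION & SPEC =====
def Spec_subarrays (arr : List Int) (out : List (Int × Int)) : Prop := out = subarrays_alt arr
instance (arr : List Int) (out : List (Int × Int)) : Decidable (Spec_subarrays arr out) := by unfold Spec_subarrays; infer_instance

-- ===== CLAIM (what is proved, stated in full; the proofs are below) =====
def Claim_equal_subarrays : Prop := ∀ (arr : List Int), Dom_subarrays arr → Spec_subarrays arr (subarrays arr)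

-- ===== LEMMAS AND PROOFS =====

-- pvP arr k = sum of the first k elements of arr (the k-th prefix sum), k as Int
def pvP (arr : List Int) (k : Int) : Int := (arr.take k.toNat).sum

-- the prefix list B builds, in closed form
def pvPref (arr : List Int) : List Int :=
  (PySem.List.pyRange 0 ((arr.length : Int) + 1) 1).map (pvP arr)

lemma pvP_succ (arr : List Int) (a : Int) (h0 : 0 ≤ a) (h1 : a < arr.length) :
    pvP arr (a + 1) = pvP arr a + PySem.List.pyGetD arr a 0 := by
  have hk : (a + 1).toNat = a.toNat + 1 := by omega
  have hlen : a.toNat < arr.length := by omega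
  rw [pvP, pvP, hk, List.sum_take_succ _ _ hlen,
    PySem.List.pyGetD_eq_getElem (h0 := h0) (h1 := by exact_mod_cast h1)]

-- A's inner loop: running total t starting at position a, appends (start, e) exactly
-- when t plus the sum of arr[a..e] vanishes
lemma innerA_eq (arr : List Int) (start : Int) :
    ∀ (a t : Int) (res : List (Int × Int)), 0 ≤ a →
    ((PySem.List.pyRange a (arr.length : Int) 1).foldl
      (fun (st : Int × List (Int × Int)) e =>
        (st.1 + PySem.List.pyGetD arr e 0,
          if st.1 + PySem.List.pyGetD arr e 0 = 0 then st.2 ++ [(start, e)] else st.2))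
      (t, res)).2
    = res ++ ((PySem.List.pyRange a (arr.length : Int) 1).filter
        (fun e => t + pvP arr (e + 1) - pvP arr a == 0)).map (fun e => (start, e)) := by
  intro a t res ha
  generalize hk : ((arr.length : Int) - a).toNat = k
  induction k generalizing a t res with
  | zero =>
      rw [PySem.List.pyRange_one_eq_nil (by omega)]
      simp
  | succ k ih =>
      have hlt : a < (arr.length : Int) := by omega
      rw [PySem.List.pyRange_one_cons hlt]
      simp only [List.foldl_cons, List.filter_cons]
      have hg : pvP arr (a + 1) = pvP arr a + PySem.List.pyGetD arr a 0 := pvP_succ arr a ha hlt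
      have hcond : (t + pvP arr (a + 1) - pvP arr a == 0) = (t + PySem.List.pyGetD arr a 0 == 0) := by
        rw [hg]; congr 1; ring
      rw [hcond]
      have ihs := ih (a + 1) (t + PySem.List.pyGetD arr a 0)
      have hfilt : ∀ e : Int,
          ((t + PySem.List.pyGetD arr a 0) + pvP arr (e + 1) - pvP arr (a + 1) == 0)
          = (t + pvP arr (e + 1) - pvP arr a == 0) := by
        intro e; rw [hg]; congr 1; ring
      rw [ihs _ (by omega) (by omega), List.filter_congr (fun e _ => hfilt e)]
      by_cases h0 : t + PySem.List.pyGetD arr a 0 = 0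
      · simp [h0]
      · simp [h0]

lemma pvPref_snoc (done : List Int) (x : Int) :
    pvPref (done ++ [x]) = pvPref done ++ [done.sum + x] := by
  unfold pvPref
  have h2 : ((done ++ [x]).length : Int) + 1 = ((done.length : Int) + 1) + 1 := by simp
  rw [h2, PySem.List.pyRange_one_succ_right (by positivity), List.map_append, List.map_singleton]
  congr 1
  · apply List.map_congr_left
    intro k hk
    rw [PySem.List.mem_pyRange_one] at hk
    unfold pvP
    rw [List.take_append_of_le_length (by omega)]
  · unfold pvP
    have h3 : ((done.length : Int) + 1).toNat = done.length + 1 := by omega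
    rw [h3, List.take_of_length_le (by simp), List.sum_append, List.sum_singleton]

lemma pvPref_last (done : List Int) :
    PySem.List.pyGetD (pvPref done) (-1) 0 = done.sum := by
  unfold pvPref
  rw [PySem.List.pyRange_one_succ_right (by positivity), List.map_append, List.map_singleton,
    PySem.List.pyGetD_neg_one_append_singleton]
  simp [pvP]

lemma pref_gen : ∀ (rest done : List Int),
    rest.foldl (fun p x => p ++ [PySem.List.pyGetD p (-1) 0 + x]) (pvPref done)
    = pvPref (done ++ rest) := by
  intro rest
  induction rest with
  | nil => intro done; simp
  | cons x rs ih =>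
      intro done
      rw [List.foldl_cons, pvPref_last, ← pvPref_snoc, ih (done ++ [x]), List.append_assoc]
      rfl

lemma pref_fold_eq (arr : List Int) :
    arr.foldl (fun p x => p ++ [PySem.List.pyGetD p (-1) 0 + x]) [0] = pvPref arr := by
  have hnil : pvPref [] = [0] := by decide
  rw [← List.nil_append arr, ← pref_gen arr [], hnil]
  rfl

-- B's grouping loop: the bucket of v is the list of positions whose value is v
lemma groupD : ∀ (l : List (Int × Int)) (d : PySem.Dict Int (List Int)) (v : Int),
    (l.foldl (fun d tv => d.insert tv.2 (d.getD tv.2 [] ++ [tv.1])) d).getD v []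
    = d.getD v [] ++ (l.filter (fun tv => tv.2 == v)).map (·.1) := by
  intro l
  induction l with
  | nil => intro d v; simp
  | cons tv rest ih =>
      intro d v
      rw [List.foldl_cons, ih, PySem.Dict.getD_insert, List.filter_cons]
      by_cases h : tv.2 = v
      · simp [h]
      · simp [h, Ne.symm h]

lemma bucket_eq (arr : List Int) (v : Int) :
    ((PySem.List.enumerate (pvPref arr) 0).foldl
      (fun d tv => d.insert tv.2 (d.getD tv.2 [] ++ [tv.1]))
      (PySem.Dict.empty : PySem.Dict Int (List Int))).getD v []
    = (PySem.List.pyRange 0 ((arr.length : Int) + 1) 1).filter (fun j => pvP arr j == v) := by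
  rw [groupD, PySem.List.enumerate_eq_map_pyRange (d := 0)]
  have hlen : PySem.List.len (pvPref arr) = (arr.length : Int) + 1 := by
    simp [pvPref, PySem.List.len, PySem.List.length_pyRange_one]
  rw [hlen, List.filter_map, List.map_map]
  have hfc : ∀ j ∈ PySem.List.pyRange 0 ((arr.length : Int) + 1) 1,
      (((fun tv : Int × Int => tv.2 == v) ∘ fun j => (j, PySem.List.pyGetD (pvPref arr) j 0)) j)
      = (pvP arr j == v) := by
    intro j hj
    rw [PySem.List.mem_pyRange_one] at hj
    simp only [Function.comp]
    rw [pvPref, PySem.List.pyGetD_map_pyRange_of_nonneg _ _ _ _ hj.1 hj.2]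
  rw [List.filter_congr hfc]
  simp [Function.comp_def]

lemma pyRange_shift (a b : Int) :
    PySem.List.pyRange (a + 1) (b + 1) 1 = (PySem.List.pyRange a b 1).map (· + 1) := by
  rw [PySem.List.pyRange_one, PySem.List.pyRange_one, List.map_map]
  have h : b + 1 - (a + 1) = b - a := by ring
  rw [h]
  apply List.map_congr_left
  intro k _
  simp [Function.comp]
  ring

-- per-start agreement: B's bucket scan emits exactly A's zero-sum ends, in the same order
lemma per_i (arr : List Int) (i : Int) (h0 : 0 ≤ i) (hi : i < (arr.length : Int)) :
    (((PySem.List.pyRange 0 ((arr.length : Int) + 1) 1).filter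
        (fun j => pvP arr j == pvP arr i)).filter (fun t => decide (t > i))).map
      (fun t => (i, t - 1))
    = ((PySem.List.pyRange i (arr.length : Int) 1).filter
        (fun e => (0 : Int) + pvP arr (e + 1) - pvP arr i == 0)).map (fun e => (i, e)) := by
  rw [List.filter_filter]
  rw [PySem.List.pyRange_one_append 0 (i + 1) ((arr.length : Int) + 1) (by omega) (by omega),
    List.filter_append]
  have hlo : (PySem.List.pyRange 0 (i + 1) 1).filter
      (fun a => decide (a > i) && (pvP arr a == pvP arr i)) = [] := by
    apply List.filter_eq_nil_iff.mpr
    intro j hj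
    rw [PySem.List.mem_pyRange_one] at hj
    simp
    omega
  rw [hlo, List.nil_append]
  have hhi : ∀ j ∈ PySem.List.pyRange (i + 1) ((arr.length : Int) + 1) 1,
      (decide (j > i) && (pvP arr j == pvP arr i)) = (pvP arr j == pvP arr i) := by
    intro j hj
    rw [PySem.List.mem_pyRange_one] at hj
    simp
    omega
  rw [List.filter_congr hhi, pyRange_shift, List.filter_map, List.map_map]
  have hfe : ∀ e ∈ PySem.List.pyRange i (arr.length : Int) 1,
      (((fun j => pvP arr j == pvP arr i) ∘ (· + 1)) e)
      = ((0 : Int) + pvP arr (e + 1) - pvP arr i == 0) := by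
    intro e _
    simp only [Function.comp]
    rw [Bool.eq_iff_iff]
    simp only [beq_iff_eq]
    omega
  rw [List.filter_congr hfe]
  apply List.map_congr_left
  intro e _
  simp [Function.comp]

theorem subarrays_spec : Claim_equal_subarrays := by
  unfold Claim_equal_subarrays Spec_subarrays
  intro arr _
  rw [subarrays, subarrays_alt]
  simp only [pref_fold_eq]
  -- A side: per-start closed form, then flatMap
  rw [PySem.List.foldl_congr_mem _ _
      (fun (result : List (Int × Int)) start =>
        result ++ ((PySem.List.pyRange start (arr.length : Int) 1).filter
          (fun e => (0 : Int) + pvP arr (e + 1) - pvP arr start == 0)).map (fun e => (start, e))) _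
    (by
      intro acc start hs
      rw [PySem.List.mem_pyRange_one] at hs
      exact innerA_eq arr start start 0 acc hs.1)]
  rw [PySem.List.foldl_append_eq_flatMap]
  -- B side: bucket closed form, then flatMap
  rw [PySem.List.foldl_congr_mem _ _
      (fun (result : List (Int × Int)) i =>
        result ++ (((PySem.List.pyRange 0 ((arr.length : Int) + 1) 1).filter
            (fun j => pvP arr j == pvP arr i)).filter (fun t => decide (t > i))).map
          (fun t => (i, t - 1))) _
    (by
      intro acc i hi
      rw [PySem.List.mem_pyRange_one] at hi
      rw [show PySem.List.pyGetD (pvPref arr) i 0 = pvP arr i by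
        rw [pvPref, PySem.List.pyGetD_map_pyRange_of_nonneg _ _ _ _ hi.1 (by omega)]]
      rw [bucket_eq]
      exact PySem.List.foldl_append_ite (p := fun t => t > i) (f := fun t => (i, t - 1)) ..)]
  rw [PySem.List.foldl_append_eq_flatMap]
  simp only [List.nil_append]
  apply List.flatMap_congr
  intro i hi
  rw [PySem.List.mem_pyRange_one] at hi
  exact (per_i arr i hi.1 hi.2).symm
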